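-- pv_equiv track=rewrite | github.com/haya14busa/atcoder | code_festival_2015/c.py | solve
-- ===== SOURCE A (Python) =====
-- def solve(n, t, xys):
--     assert 1 <= n <= 10 ** 5
--     assert 0 <= t <= 10 ** 9
--     assert len(xys) > 0
--     ds = sorted(map(lambda xy: xy[0] - xy[1], xys), reverse = True)
--     time = sum(map(lambda xy: xy[0], xys))
--     if time <= t:
--         return 0
--     for i, d in enumerate(ds):
--         time -= d
--         if time <= t:
--             return i + 1
--     return -1
-- ===== SOURCE B (Python) =====
-- def solve(n, t, xys):
--     assert 1 <= n <= 10 ** 5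
--     assert 0 <= t <= 10 ** 9
--     assert len(xys) > 0
--     total = sum(x for x, _ in xys)
--     if total <= t:
--         return 0
--     prefix = []
--     acc = 0
--     for d in sorted((x - y for x, y in xys if x > y), reverse=True):
--         acc += d
--         prefix.append(acc)
--     need = total - t
--     if not prefix or prefix[-1] < need:
--         return -1
--     lo, hi = 0, len(prefix) - 1
--     while lo < hi:
--         mid = (lo + hi) // 2
--         if prefix[mid] >= need:
--             hi = mid
--         else:
--             lo = mid + 1
--     return lo + 1
-- ===== Notes on version B (the rewrite author's own statement) =====
-- stated objective: alternative
-- what changed: A subtracts the descending-sorted differences one by one with an early return; B keeps only the strictly positive differences, builds their prefix-sum table once and binary-searches it for the smallest prefix covering need = total - t.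
import Mathlib
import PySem

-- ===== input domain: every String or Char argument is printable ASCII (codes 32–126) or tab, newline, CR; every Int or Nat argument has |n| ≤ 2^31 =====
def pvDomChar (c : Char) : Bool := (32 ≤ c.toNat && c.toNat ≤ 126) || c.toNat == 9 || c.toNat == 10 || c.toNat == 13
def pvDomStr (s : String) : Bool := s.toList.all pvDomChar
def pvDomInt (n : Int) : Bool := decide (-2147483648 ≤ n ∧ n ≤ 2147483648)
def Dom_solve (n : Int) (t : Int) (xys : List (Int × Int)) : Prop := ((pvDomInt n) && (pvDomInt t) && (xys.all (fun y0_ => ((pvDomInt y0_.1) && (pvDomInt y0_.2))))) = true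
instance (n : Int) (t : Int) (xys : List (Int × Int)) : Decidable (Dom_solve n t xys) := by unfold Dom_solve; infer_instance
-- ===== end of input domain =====

-- B replaces A's element-by-element subtracting scan over all sorted differences by a prefix-sum
-- table over the strictly positive differences plus a hand-written binary search (alternative
-- decomposition; the sort still dominates, so no speed is claimed).

-- ===== PORT A =====
-- the 'for i, d in enumerate(ds): time -= d; if time <= t: return i + 1' loop, else falls through to -1
def solveLoopA (t : Int) : Int → Int → List Int → Int
  | _, _, [] => -1
  | time, i, d :: rest =>
    if time - d ≤ t then i + 1 else solveLoopA t (time - d) (i + 1) rest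

def solve (n : Int) (t : Int) (xys : List (Int × Int)) : Int :=
  -- the three asserts are Pre_solve
  let ds := PySem.List.sorted (xys.map (fun xy => xy.1 - xy.2)) (fun d => d) true
  let time := (xys.map (fun xy => xy.1)).sum
  if time ≤ t then 0 else solveLoopA t time 0 ds

-- ===== PORT B =====
-- the 'while lo < hi' binary-search loop of Source B; lo, hi are nonnegative Python ints, rendered as
-- Nat (so '//2' is Nat division, exact here); ps[mid] is rendered total as getD (mid is always in
-- range on reachable calls)
def bsearchLB (ps : List Int) (need : Int) (lo hi : Nat) : Nat :=
  if lo < hi then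
    let mid := (lo + hi) / 2
    if need ≤ ps.getD mid 0 then bsearchLB ps need lo mid
    else bsearchLB ps need (mid + 1) hi
  else lo
termination_by hi - lo
decreasing_by all_goals omega

def solve_alt (n : Int) (t : Int) (xys : List (Int × Int)) : Int :=
  -- the three asserts are Pre_solve
  let total := (xys.map (fun p => p.1)).sum
  if total ≤ t then 0
  else
    -- prefix = []; acc = 0; for d in sorted((x-y for x,y in xys if x > y), reverse=True): acc += d; prefix.append(acc)
    let ps := ((PySem.List.sorted ((xys.filter (fun p => decide (p.2 < p.1))).map
                  (fun p => p.1 - p.2)) (fun d => d) true).foldl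
                (fun (st : List Int × Int) d => (st.1 ++ [st.2 + d], st.2 + d)) ([], 0)).1
    let need := total - t
    match ps.getLast? with                     -- 'if not prefix or prefix[-1] < need: return -1'
    | none => -1
    | some last =>
      if last < need then -1
      else ((bsearchLB ps need 0 (ps.length - 1) : Nat) : Int) + 1

-- ===== PRECONDITION & SPEC =====
-- exactly A's asserts: outside them A raises AssertionError (and so does Source B)
def Pre_solve (n : Int) (t : Int) (xys : List (Int × Int)) : Prop :=
  1 ≤ n ∧ n ≤ 100000 ∧ 0 ≤ t ∧ t ≤ 1000000000 ∧ xys ≠ []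
instance (n : Int) (t : Int) (xys : List (Int × Int)) : Decidable (Pre_solve n t xys) := by
  unfold Pre_solve; infer_instance

def pvWitness_solve : Int × Int × (List (Int × Int)) := (1, 0, [(3, 1)])

def Spec_solve (n : Int) (t : Int) (xys : List (Int × Int)) (out : Int) : Prop := out = solve_alt n t xys
instance (n : Int) (t : Int) (xys : List (Int × Int)) (out : Int) : Decidable (Spec_solve n t xys out) := by
  unfold Spec_solve; infer_instance

-- ===== CLAIM (what is proved, stated in full; the proofs are below) =====
def Claim_equal_solve : Prop := ∀ (n : Int) (t : Int) (xys : List (Int × Int)), Dom_solve n t xys → Pre_solve n t xys → Spec_solve n t xys (solve n t xys)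

-- ===== LEMMAS AND PROOFS =====

-- first index k (0-based) with  need ≤ sum of the first k+1 elements, walking left to right
def firstHit (need : Int) : List Int → Option Nat
  | [] => none
  | d :: ds => if need ≤ d then some 0 else (firstHit (need - d) ds).map (· + 1)

-- the prefix-sum list Source B builds
def pres (acc : Int) : List Int → List Int
  | [] => []
  | d :: ds => (acc + d) :: pres (acc + d) ds


theorem loopA_eq (t : Int) (ds : List Int) : ∀ (time i : Int),
    solveLoopA t time i ds =
      (match firstHit (time - t) ds with
       | some k => i + (k : Int) + 1
       | none => -1) := by
  induction ds with
  | nil => intro time i; simp [solveLoopA, firstHit]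
  | cons d rest ih =>
    intro time i
    simp only [solveLoopA, firstHit]
    by_cases h : time - d ≤ t
    · rw [if_pos h, if_pos (by omega : time - t ≤ d)]
      simp
    · rw [if_neg h, if_neg (by omega : ¬ time - t ≤ d), ih]
      have : time - d - t = time - t - d := by ring
      rw [this]
      cases firstHit (time - t - d) rest with
      | none => rfl
      | some k => simp; ring

theorem foldl_pres (l : List Int) : ∀ (P : List Int) (acc : Int),
    (l.foldl (fun (st : List Int × Int) d => (st.1 ++ [st.2 + d], st.2 + d)) (P, acc)).1
      = P ++ pres acc l := by
  induction l with
  | nil => intro P acc; simp [pres]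
  | cons d rest ih =>
    intro P acc
    simp only [List.foldl_cons, pres]
    rw [ih]
    simp

theorem pres_length (l : List Int) : ∀ acc, (pres acc l).length = l.length := by
  induction l with
  | nil => intro acc; rfl
  | cons d rest ih => intro acc; simp [pres, ih]

theorem pres_getD (l : List Int) : ∀ (k : Nat), k < l.length → ∀ acc,
    (pres acc l).getD k 0 = acc + (l.take (k + 1)).sum := by
  induction l with
  | nil => intro k hk; simp at hk
  | cons d rest ih =>
    intro k hk acc
    cases k with
    | zero => simp [pres]
    | succ k' =>
      simp only [pres, List.getD_cons_succ, List.take_succ_cons, List.sum_cons]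
      rw [ih k' (by simpa using hk) (acc + d)]
      ring

theorem pres_getLast? (l : List Int) : ∀ acc, l ≠ [] → (pres acc l).getLast? = some (acc + l.sum) := by
  induction l with
  | nil => intro acc h; exact absurd rfl h
  | cons d rest ih =>
    intro acc _
    cases rest with
    | nil => simp [pres]
    | cons e es =>
      have h1 : pres acc (d :: e :: es)
          = (acc + d) :: (acc + d + e) :: pres (acc + d + e) es := rfl
      have h2 : pres (acc + d) (e :: es) = (acc + d + e) :: pres (acc + d + e) es := rfl
      rw [h1, List.getLast?_cons_cons, ← h2, ih (acc + d) (by simp)]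
      simp
      ring

theorem takeSum_mono (l : List Int) (hpos : ∀ x ∈ l, 0 < x) {j k : Nat} (hjk : j ≤ k) :
    (l.take (j + 1)).sum ≤ (l.take (k + 1)).sum := by
  have hsplit : l.take (k + 1) = l.take (j + 1) ++ (l.drop (j + 1)).take (k - j) := by
    rw [← List.take_add]
    congr 1
    omega
  rw [hsplit, List.sum_append]
  have : 0 ≤ ((l.drop (j + 1)).take (k - j)).sum := by
    apply List.sum_nonneg
    intro x hx
    exact le_of_lt (hpos x (List.mem_of_mem_drop (List.mem_of_mem_take hx)))
  omega

theorem fh_none (need : Int) (l : List Int) (hnp : ∀ d ∈ l, d ≤ 0) (hpos : 0 < need) :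
    firstHit need l = none := by
  induction l generalizing need with
  | nil => rfl
  | cons d rest ih =>
    have hd : d ≤ 0 := hnp d (by simp)
    simp only [firstHit, if_neg (by omega : ¬ need ≤ d)]
    rw [ih (need - d) (fun x hx => hnp x (by simp [hx])) (by omega)]
    rfl

theorem fh_filter (l : List Int) (hsort : l.Pairwise (fun a b => b ≤ a)) :
    ∀ need, 0 < need →
    firstHit need l = firstHit need (l.filter (fun d => decide (0 < d))) := by
  induction l with
  | nil => intro need _; rfl
  | cons d rest ih =>
    intro need hneed
    have htail := (List.pairwise_cons.mp hsort).2
    have hall := (List.pairwise_cons.mp hsort).1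
    by_cases hd : 0 < d
    · rw [List.filter_cons_of_pos (by simpa using hd)]
      simp only [firstHit]
      by_cases hhit : need ≤ d
      · rw [if_pos hhit, if_pos hhit]
      · rw [if_neg hhit, if_neg hhit, ih htail (need - d) (by omega)]
    · rw [List.filter_cons_of_neg (by simpa using hd)]
      have hrest0 : ∀ x ∈ rest, x ≤ 0 := fun x hx => le_trans (hall x hx) (by omega)
      have hfilt : rest.filter (fun d => decide (0 < d)) = [] := by
        rw [List.filter_eq_nil_iff]
        intro x hx
        simpa using not_lt.mpr (hrest0 x hx)
      simp only [firstHit, if_neg (by omega : ¬ need ≤ d)]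
      rw [fh_none (need - d) rest hrest0 (by omega), hfilt]
      simp [firstHit]

theorem fh_some_spec (l : List Int) : ∀ need k, firstHit need l = some k →
    k < l.length ∧ need ≤ (l.take (k + 1)).sum ∧ ∀ j < k, (l.take (j + 1)).sum < need := by
  induction l with
  | nil => intro need k h; simp [firstHit] at h
  | cons d rest ih =>
    intro need k h
    simp only [firstHit] at h
    by_cases hhit : need ≤ d
    · rw [if_pos hhit] at h
      simp at h
      subst h
      refine ⟨by simp, by simpa using hhit, fun j hj => absurd hj (by omega)⟩
    · rw [if_neg hhit] at h
      cases hrec : firstHit (need - d) rest with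
      | none => rw [hrec] at h; simp at h
      | some k' =>
        rw [hrec] at h
        simp at h
        obtain ⟨hlen, hsum, hmin⟩ := ih (need - d) k' hrec
        subst h
        refine ⟨by simpa using hlen, ?_, ?_⟩
        · simp only [List.take_succ_cons, List.sum_cons]
          omega
        · intro j hj
          cases j with
          | zero =>
            simp only [List.take_succ_cons, List.take_zero, List.sum_cons, List.sum_nil]
            omega
          | succ j' =>
            have := hmin j' (by omega)
            simp only [List.take_succ_cons, List.sum_cons]
            omega

theorem fh_none_spec (l : List Int) : ∀ need, firstHit need l = none →
    ∀ j < l.length, (l.take (j + 1)).sum < need := by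
  induction l with
  | nil => intro need _ j hj; simp at hj
  | cons d rest ih =>
    intro need h j hj
    simp only [firstHit] at h
    by_cases hhit : need ≤ d
    · rw [if_pos hhit] at h; simp at h
    · rw [if_neg hhit] at h
      cases j with
      | zero => simpa using by omega
      | succ j' =>
        have hrec : firstHit (need - d) rest = none := by
          cases hx : firstHit (need - d) rest with
          | none => rfl
          | some k => rw [hx] at h; simp at h
        have := ih (need - d) hrec j' (by simpa using hj)
        simp only [List.take_succ_cons, List.sum_cons]
        omega

theorem bsearch_spec (l : List Int) (need : Int) (hpos : ∀ x ∈ l, 0 < x) :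
    ∀ (fuel lo hi : Nat), hi - lo = fuel → lo ≤ hi → hi < l.length →
      need ≤ (l.take (hi + 1)).sum →
      (∀ j < lo, (l.take (j + 1)).sum < need) →
      bsearchLB (pres 0 l) need lo hi < l.length ∧
      need ≤ (l.take (bsearchLB (pres 0 l) need lo hi + 1)).sum ∧
      ∀ j < bsearchLB (pres 0 l) need lo hi, (l.take (j + 1)).sum < need := by
  intro fuel
  induction fuel using Nat.strong_induction_on with
  | _ fuel ih =>
    intro lo hi hfuel hlohi hhi hneedhi hinv
    by_cases hlt : lo < hi
    · have heq : bsearchLB (pres 0 l) need lo hi =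
          if need ≤ (pres 0 l).getD ((lo + hi) / 2) 0 then
            bsearchLB (pres 0 l) need lo ((lo + hi) / 2)
          else bsearchLB (pres 0 l) need ((lo + hi) / 2 + 1) hi := by
        rw [bsearchLB, if_pos hlt]
      have hmid2 : (lo + hi) / 2 < hi := by omega
      rw [heq, pres_getD l ((lo + hi) / 2) (by omega) 0]
      by_cases hc : need ≤ 0 + (l.take ((lo + hi) / 2 + 1)).sum
      · rw [if_pos hc]
        exact ih ((lo + hi) / 2 - lo) (by omega) lo ((lo + hi) / 2) rfl (by omega)
          (by omega) (by omega) hinv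
      · rw [if_neg hc]
        refine ih (hi - ((lo + hi) / 2 + 1)) (by omega) ((lo + hi) / 2 + 1) hi rfl
          (by omega) hhi hneedhi ?_
        intro j hj
        have := takeSum_mono l hpos (show j ≤ (lo + hi) / 2 by omega)
        omega
    · have heq : bsearchLB (pres 0 l) need lo hi = lo := by
        rw [bsearchLB, if_neg hlt]
      rw [heq]
      have hlh : lo = hi := by omega
      exact ⟨by omega, by rw [hlh]; exact hneedhi, hinv⟩


theorem filter_sorted_eq (xys : List (Int × Int)) :
    (PySem.List.sorted (xys.map (fun xy => xy.1 - xy.2)) (fun d => d) true).filter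
        (fun d => decide (0 < d))
      = PySem.List.sorted ((xys.filter (fun p => decide (p.2 < p.1))).map (fun p => p.1 - p.2))
          (fun d => d) true := by
  have h1 : ((PySem.List.sorted (xys.map (fun xy => xy.1 - xy.2)) (fun d => d) true).filter
      (fun d => decide (0 < d))).Perm ((xys.map (fun xy => xy.1 - xy.2)).filter
      (fun d => decide (0 < d))) :=
    (PySem.List.sorted_perm (xys.map (fun xy => xy.1 - xy.2)) (fun d => d) true).filter _
  have h2 : (xys.map (fun xy => xy.1 - xy.2)).filter (fun d => decide (0 < d))
      = (xys.filter (fun p => decide (p.2 < p.1))).map (fun p => p.1 - p.2) := by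
    rw [List.filter_map]
    congr 1
    apply List.filter_congr
    intro p _
    simp only [Function.comp]
    by_cases hp : p.2 < p.1
    · rw [decide_eq_true (by omega : (0 : Int) < p.1 - p.2), decide_eq_true hp]
    · rw [decide_eq_false (by omega : ¬ (0 : Int) < p.1 - p.2), decide_eq_false hp]
  rw [h2] at h1
  refine List.Perm.eq_of_pairwise (le := fun a b : Int => b ≤ a)
    (fun a b _ _ hab hba => le_antisymm hba hab) ?_ ?_
    (h1.trans (PySem.List.sorted_perm _ (fun d => d) true).symm)
  · exact (PySem.List.sorted_pairwise_rev (xys.map (fun xy => xy.1 - xy.2)) (fun d => d)).filter _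
  · exact PySem.List.sorted_pairwise_rev _ (fun d => d)

-- ===== VERDICT (by name: the statement is the Claim_ definition above) =====
theorem solve_spec : Claim_equal_solve := by
  intro n t xys _ _
  show solve n t xys = solve_alt n t xys
  simp only [solve, solve_alt]
  by_cases htot : (xys.map (fun xy => xy.1)).sum ≤ t
  · rw [if_pos htot, if_pos htot]
  · rw [if_neg htot, if_neg htot]
    set total := (xys.map (fun xy => xy.1)).sum with htotal
    set need := total - t with hneed_def
    have hneed : 0 < need := by omega
    set ds := PySem.List.sorted (xys.map (fun xy => xy.1 - xy.2)) (fun d => d) true with hds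
    set pos := PySem.List.sorted ((xys.filter (fun p => decide (p.2 < p.1))).map
        (fun p => p.1 - p.2)) (fun d => d) true with hposdef
    have hpos : ∀ x ∈ pos, 0 < x := by
      intro x hx
      rw [hposdef, PySem.List.mem_sorted] at hx
      obtain ⟨p, hp, hx⟩ := List.mem_map.mp hx
      have := List.of_mem_filter hp
      simp at this
      omega
    have hfold : ((pos.foldl (fun (st : List Int × Int) d => (st.1 ++ [st.2 + d], st.2 + d))
        ([], 0)).1 : List Int) = pres 0 pos := by
      rw [foldl_pres]; rfl
    have hsort : ds.Pairwise (fun a b => b ≤ a) :=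
      PySem.List.sorted_pairwise_rev (xys.map (fun xy => xy.1 - xy.2)) (fun d => d)
    have hfh_eq : firstHit need ds = firstHit need pos := by
      rw [fh_filter ds hsort need hneed, hds, filter_sorted_eq, hposdef]
    rw [loopA_eq t ds total 0, hfold, hfh_eq]
    cases hposnil : pos with
    | nil =>
      simp [pres, firstHit]
    | cons p0 prest =>
      rw [← hposnil]
      have hne : pos ≠ [] := by rw [hposnil]; simp
      have hlen : 0 < pos.length := List.length_pos_iff.mpr hne
      have hlast := pres_getLast? pos 0 hne
      rw [hlast]
      have htakeall : pos.take ((pos.length - 1) + 1) = pos := by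
        have : pos.length - 1 + 1 = pos.length := by omega
        rw [this, List.take_length]
      by_cases hbig : 0 + pos.sum < need
      · -- need exceeds the total of positive differences: both return -1
        have hfh : firstHit need pos = none := by
          cases hfh : firstHit need pos with
          | none => rfl
          | some k =>
            exfalso
            obtain ⟨hk, hsum, _⟩ := fh_some_spec pos need k hfh
            have := takeSum_mono pos hpos (show k ≤ pos.length - 1 by omega)
            rw [htakeall] at this
            omega
        simp only [hfh, if_pos hbig]
      · cases hfh : firstHit need pos with
        | none =>
          exfalso
          have := fh_none_spec pos need hfh (pos.length - 1) (by omega)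
          rw [htakeall] at this
          omega
        | some k =>
          obtain ⟨hk, hksum, hkmin⟩ := fh_some_spec pos need k hfh
          obtain ⟨hr, hrsum, hrmin⟩ := bsearch_spec pos need hpos (pos.length - 1) 0
            (pos.length - 1) (by omega) (by omega) (by omega)
            (by rw [htakeall]; omega) (fun j hj => absurd hj (by omega))
          set r := bsearchLB (pres 0 pos) need 0 (pos.length - 1) with hrdef
          have hrk : r = k := by
            rcases lt_trichotomy r k with h | h | h
            · have := hkmin r h; omega
            · exact h
            · have := hrmin k h; omega
          simp only [if_neg hbig, pres_length, ← hrdef, hrk]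
          ring
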